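-- pv_equiv track=rewrite | github.com/AkihikoTakahashi/ProjectEuler | Problem032.py | is_pandigit
-- ===== SOURCE A (Python) =====
-- def is_pandigit(n):
--
--     digit = 0
--     count = 0
--     tmp = 0
--     while n > 0:
--         tmp = digit
--         digit = digit | 1 << ((n % 10 - 1) % 32)
--         if digit == tmp:
--             return False
--         n //= 10
--         count += 1
--     return digit == (1 << count) - 1
-- ===== SOURCE B (Python) =====
-- def is_pandigit(n):
--     digits = []
--     while n > 0:
--         digits.append(n % 10)
--         n //= 10
--     return sorted(digits) == list(range(1, len(digits) + 1))
-- ===== Notes on version B (the rewrite author's own statement) =====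
-- stated objective: idiomatic
-- what changed: Replaces the incremental bitmask OR with per-digit duplicate early-return by collecting all digits and comparing sorted(digits) to the expected sequence 1..len.
import Mathlib
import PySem

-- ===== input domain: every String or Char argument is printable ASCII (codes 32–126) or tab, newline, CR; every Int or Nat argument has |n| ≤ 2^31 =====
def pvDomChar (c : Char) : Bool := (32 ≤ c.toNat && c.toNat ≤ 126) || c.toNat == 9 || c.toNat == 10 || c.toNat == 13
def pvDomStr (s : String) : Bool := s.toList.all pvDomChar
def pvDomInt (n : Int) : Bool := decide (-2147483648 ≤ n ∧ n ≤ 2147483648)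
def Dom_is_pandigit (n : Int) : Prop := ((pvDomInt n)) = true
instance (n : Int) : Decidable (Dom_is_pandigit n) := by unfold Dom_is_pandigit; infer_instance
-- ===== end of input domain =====

-- B replaces A's incremental bitmask-OR with per-digit duplicate early-return by collecting
-- all digits and comparing sorted(digits) with [1..len]; same return value everywhere.

-- ===== PORT A =====
-- A's while loop, state (n, digit, count); the shift amount (n%10-1)%32 lies in [0,32), so .toNat is exact
def aLoop (n digit count : Int) : Bool :=
  if h : n > 0 then
    let tmp := digit
    let digit' := PySem.Int.bor digit ((1 : Int) <<< ((PySem.Int.mod (PySem.Int.mod n 10 - 1) 32).toNat))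
    if digit' == tmp then false
    else aLoop (PySem.Int.floordiv n 10) digit' (count + 1)
  else digit == ((1 : Int) <<< count.toNat) - 1
  -- count starts at 0 and is only incremented, so count ≥ 0 at every call: count.toNat is exact for 1 << count
termination_by n.toNat
decreasing_by
  rw [PySem.Int.floordiv_eq_ediv_of_pos (by norm_num : (0:Int) < 10)]
  omega

def is_pandigit (n : Int) : Bool := aLoop n 0 0

-- ===== PORT B =====
-- B's while loop: the list of digits of n, least significant first
def digitsOf (n : Int) : List Int :=
  if _h : n > 0 then PySem.Int.mod n 10 :: digitsOf (PySem.Int.floordiv n 10) else []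
termination_by n.toNat
decreasing_by
  rw [PySem.Int.floordiv_eq_ediv_of_pos (by norm_num : (0:Int) < 10)]
  omega

def is_pandigit_alt (n : Int) : Bool :=
  let digits := digitsOf n
  PySem.List.sorted digits (fun x => x) false ==
    PySem.List.pyRange 1 ((digits.length : Int) + 1) 1

-- ===== PRECONDITION & SPEC =====
def Spec_is_pandigit (n : Int) (out : Bool) : Prop := out = is_pandigit_alt n
instance (n : Int) (out : Bool) : Decidable (Spec_is_pandigit n out) := by unfold Spec_is_pandigit; infer_instance

-- ===== CLAIM (what is proved, stated in full; the proofs are below) =====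
def Claim_equal_is_pandigit : Prop := ∀ (n : Int), Dom_is_pandigit n → Spec_is_pandigit n (is_pandigit n)

-- ===== LEMMAS AND PROOFS =====

def ix (d : Int) : Nat := (PySem.Int.mod (d - 1) 32).toNat

def goA (L : List Int) (m c : Nat) : Bool :=
  match L with
  | [] => m == 2 ^ c - 1
  | d :: t =>
    let m' := m ||| 2 ^ ix d
    if m' = m then false else goA t m' (c + 1)

theorem shift_one (k : Nat) : ((1 : Int) <<< k) = ((2 ^ k : Nat) : Int) := by
  simp [Int.shiftLeft_eq]

theorem aLoop_base (dn cn : Nat) :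
    ((dn : Int) == ((1 : Int) <<< ((cn : Int)).toNat) - 1) = (dn == 2 ^ cn - 1) := by
  rw [Int.toNat_natCast, shift_one, Bool.eq_iff_iff]
  simp only [beq_iff_eq]
  have h1 : (1:Nat) ≤ 2 ^ cn := Nat.one_le_two_pow
  omega

theorem aLoop_eq_goA' : ∀ (N : Nat) (n : Int), n.toNat ≤ N → ∀ (dn cn : Nat),
    aLoop n (dn : Int) (cn : Int) = goA (digitsOf n) dn cn := by
  intro N
  induction N with
  | zero =>
    intro n hn dn cn
    have h : ¬ n > 0 := by omega
    rw [aLoop, digitsOf]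
    simp only [h, dite_false, goA]
    rw [aLoop_base]
  | succ N ihN =>
    intro n hn dn cn
    by_cases h : n > 0
    · rw [aLoop, digitsOf]
      simp only [h, dite_true]
      have hdig : PySem.Int.bor (dn : Int) ((1 : Int) <<< ((PySem.Int.mod (PySem.Int.mod n 10 - 1) 32).toNat)) =
          ((dn ||| 2 ^ ix (PySem.Int.mod n 10) : Nat) : Int) := by
        rw [show (PySem.Int.mod (PySem.Int.mod n 10 - 1) 32).toNat = ix (PySem.Int.mod n 10) from rfl,
          shift_one, PySem.Int.bor_natCast]
      rw [hdig]
      have hrec : (PySem.Int.floordiv n 10).toNat ≤ N := by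
        rw [PySem.Int.floordiv_eq_ediv_of_pos (by norm_num : (0:Int) < 10)]
        omega
      by_cases hdup : dn ||| 2 ^ ix (PySem.Int.mod n 10) = dn
      · rw [if_pos (by simp only [beq_iff_eq]; exact_mod_cast congrArg (fun x : Nat => (x : Int)) hdup)]
        simp only [goA]
        rw [if_pos hdup]
      · rw [if_neg (by simp only [beq_iff_eq]; intro hcontra; exact hdup (by exact_mod_cast hcontra))]
        simp only [goA]
        rw [if_neg hdup]
        rw [show ((cn : Int) + 1) = (((cn + 1 : Nat)) : Int) by push_cast; ring]
        exact ihN _ hrec _ _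
    · rw [aLoop, digitsOf]
      simp only [h, dite_false, goA]
      rw [aLoop_base]

theorem aLoop_eq_goA (n : Int) (dn cn : Nat) :
    aLoop n (dn : Int) (cn : Int) = goA (digitsOf n) dn cn :=
  aLoop_eq_goA' n.toNat n le_rfl dn cn

def orBits (L : List Int) : Nat := L.foldr (fun d acc => 2 ^ ix d ||| acc) 0

theorem orBits_cons (d : Int) (t : List Int) : orBits (d :: t) = 2 ^ ix d ||| orBits t := rfl

theorem testBit_orBits (L : List Int) (i : Nat) :
    (orBits L).testBit i = true ↔ i ∈ L.map ix := by
  induction L with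
  | nil => simp [orBits]
  | cons d t ih =>
    rw [orBits_cons]
    simp only [Nat.testBit_or, Bool.or_eq_true, Nat.testBit_two_pow, decide_eq_true_eq,
      List.map_cons, List.mem_cons]
    rw [ih]
    constructor
    · rintro (h | h)
      · exact Or.inl h.symm
      · exact Or.inr h
    · rintro (h | h)
      · exact Or.inl h.symm
      · exact Or.inr h

theorem lor_pow_eq_self_iff (m k : Nat) : (m ||| 2 ^ k = m) ↔ m.testBit k := by
  constructor
  · intro h; have := congrArg (Nat.testBit · k) h
    simpa [Nat.testBit_or] using this
  · intro h; apply Nat.eq_of_testBit_eq; intro i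
    rcases eq_or_ne i k with rfl | hne
    · simp [Nat.testBit_or, h]
    · simp [Nat.testBit_or, Nat.testBit_two_pow_of_ne (Ne.symm hne)]

theorem goA_spec (L : List Int) : ∀ (m c : Nat),
    goA L m c = true ↔
      ((L.map ix).Nodup ∧ (∀ d ∈ L, ¬ m.testBit (ix d) = true) ∧
        (m ||| orBits L) = 2 ^ (c + L.length) - 1) := by
  induction L with
  | nil =>
    intro m c
    simp [goA, orBits]
  | cons d t ih =>
    intro m c
    simp only [goA]
    by_cases hdup : m ||| 2 ^ ix d = m
    · rw [if_pos hdup]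
      simp only [Bool.false_eq_true, false_iff]
      rintro ⟨-, hfresh, -⟩
      exact hfresh d List.mem_cons_self ((lor_pow_eq_self_iff m (ix d)).mp hdup)
    · rw [if_neg hdup]
      rw [ih (m ||| 2 ^ ix d) (c + 1)]
      have hnotbit : ¬ m.testBit (ix d) = true := fun hb => hdup ((lor_pow_eq_self_iff m (ix d)).mpr hb)
      have hbit : ∀ e : Int, ((m ||| 2 ^ ix d).testBit (ix e) = true) ↔
          (m.testBit (ix e) = true ∨ ix d = ix e) := by
        intro e; simp [Nat.testBit_or, Nat.testBit_two_pow]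
      have hexp : c + 1 + t.length = c + (t.length + 1) := by omega
      constructor
      · rintro ⟨hnd, hfresh, hsum⟩
        refine ⟨?_, ?_, ?_⟩
        · simp only [List.map_cons, List.nodup_cons]
          refine ⟨?_, hnd⟩
          intro hmem
          obtain ⟨e, het, hix⟩ := List.mem_map.mp hmem
          exact hfresh e het ((hbit e).mpr (Or.inr hix.symm))
        · intro e he
          rcases List.mem_cons.mp he with rfl | het
          · exact hnotbit
          · exact fun hb => hfresh e het ((hbit e).mpr (Or.inl hb))
        · rw [orBits_cons, ← Nat.or_assoc, hsum, hexp]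
          simp
      · rintro ⟨hnd, hfresh, hsum⟩
        simp only [List.map_cons, List.nodup_cons] at hnd
        refine ⟨hnd.2, ?_, ?_⟩
        · intro e het hb
          rcases (hbit e).mp hb with hb' | hix
          · exact hfresh e (List.mem_cons_of_mem d het) hb'
          · exact hnd.1 (List.mem_map.mpr ⟨e, het, hix.symm⟩)
        · rw [orBits_cons, ← Nat.or_assoc] at hsum
          rw [hsum, hexp]
          simp

theorem ix_zero_eq : ix 0 = 31 := by decide

theorem ix_of_pos (d : Int) (h1 : 1 ≤ d) (h2 : d < 10) : ix d = (d - 1).toNat := by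
  interval_cases d <;> decide

theorem ix_ne_nine (d : Int) (h1 : 0 ≤ d) (h2 : d < 10) : ix d ≠ 9 := by
  interval_cases d <;> decide

theorem goA_zero_iff_perm (L : List Int) (hb : ∀ d ∈ L, 0 ≤ d ∧ d < 10) :
    goA L 0 0 = true ↔ L.Perm (PySem.List.pyRange 1 ((L.length : Int) + 1) 1) := by
  rw [goA_spec]
  have hmemR : ∀ x : Int, x ∈ PySem.List.pyRange 1 ((L.length : Int) + 1) 1 ↔
      1 ≤ x ∧ x < (L.length : Int) + 1 := fun x => PySem.List.mem_pyRange_one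
  constructor
  · rintro ⟨hnd, -, hsum⟩
    rw [Nat.zero_or] at hsum
    have hmem : ∀ i : Nat, i ∈ L.map ix ↔ i < L.length := by
      intro i
      rw [← testBit_orBits, hsum, Nat.testBit_two_pow_sub_one]
      simp
    have hzero : (0 : Int) ∉ L := by
      intro h0
      have h31 : (31 : Nat) ∈ L.map ix := List.mem_map.mpr ⟨0, h0, ix_zero_eq⟩
      have hlen : 31 < L.length := (hmem 31).mp h31
      obtain ⟨d, hd, hix9⟩ := List.mem_map.mp ((hmem 9).mpr (by omega))
      exact ix_ne_nine d (hb d hd).1 (hb d hd).2 hix9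
    have hpos : ∀ d ∈ L, 1 ≤ d ∧ d < 10 := by
      intro d hd
      rcases hb d hd with ⟨h0, h10⟩
      refine ⟨?_, h10⟩
      rcases eq_or_lt_of_le h0 with heq | hlt
      · exact absurd (heq ▸ hd) hzero
      · omega
    have hlen9 : L.length ≤ 9 := by
      by_contra hlen
      obtain ⟨d, hd, hix9⟩ := List.mem_map.mp ((hmem 9).mpr (by omega))
      exact ix_ne_nine d (hb d hd).1 (hb d hd).2 hix9
    refine (List.perm_ext_iff_of_nodup (hnd.of_map) (PySem.List.nodup_pyRange_one _ _)).mpr ?_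
    intro x
    rw [hmemR x]
    constructor
    · intro hx
      rcases hpos x hx with ⟨h1, h9⟩
      have : ix x ∈ L.map ix := List.mem_map.mpr ⟨x, hx, rfl⟩
      rw [hmem, ix_of_pos x h1 h9] at this
      omega
    · rintro ⟨h1, hx⟩
      have hxlen : (x - 1).toNat < L.length := by omega
      obtain ⟨d, hd, hixd⟩ := List.mem_map.mp ((hmem _).mpr hxlen)
      rcases hpos d hd with ⟨hd1, hd9⟩
      rw [ix_of_pos d hd1 hd9] at hixd
      have : d = x := by omega
      exact this ▸ hd
  · intro hperm
    have hndR : (PySem.List.pyRange 1 ((L.length : Int) + 1) 1).Nodup := PySem.List.nodup_pyRange_one _ _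
    have hndL : L.Nodup := hperm.nodup_iff.mpr hndR
    have hmemL : ∀ x : Int, x ∈ L ↔ 1 ≤ x ∧ x < (L.length : Int) + 1 := by
      intro x; rw [hperm.mem_iff, hmemR]
    have hlen9 : L.length ≤ 9 := by
      by_contra hlen
      have h10 : (10 : Int) ∈ L := (hmemL 10).mpr ⟨by norm_num, by omega⟩
      exact absurd (hb 10 h10).2 (by norm_num)
    have hpos : ∀ d ∈ L, 1 ≤ d ∧ d < 10 := by
      intro d hd
      have := (hmemL d).mp hd
      exact ⟨this.1, (hb d hd).2⟩
    refine ⟨?_, fun d _ => by simp, ?_⟩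
    · refine hndL.map_on ?_
      intro x hx y hy hxy
      rcases hpos x hx with ⟨hx1, hx9⟩
      rcases hpos y hy with ⟨hy1, hy9⟩
      rw [ix_of_pos x hx1 hx9, ix_of_pos y hy1 hy9] at hxy
      omega
    · rw [Nat.zero_or]
      apply Nat.eq_of_testBit_eq
      intro i
      rw [Nat.testBit_two_pow_sub_one]
      rw [show (orBits L).testBit i = decide (i ∈ L.map ix) by
        rcases Bool.eq_false_or_eq_true ((orBits L).testBit i) with ht | hf
        · rw [ht]; symm; rw [decide_eq_true_eq]; exact (testBit_orBits L i).mp ht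
        · rw [hf]; symm; rw [decide_eq_false_iff_not]
          intro hmem
          have := (testBit_orBits L i).mpr hmem
          rw [hf] at this
          exact Bool.false_ne_true this]
      congr 1
      simp only [eq_iff_iff]
      constructor
      · intro hmem
        obtain ⟨d, hd, hixd⟩ := List.mem_map.mp hmem
        rcases hpos d hd with ⟨hd1, hd9⟩
        have := (hmemL d).mp hd
        rw [ix_of_pos d hd1 hd9] at hixd
        omega
      · intro hi
        have hiL : ((i : Int) + 1) ∈ L := by
          rw [hmemL]; omega
        refine List.mem_map.mpr ⟨(i : Int) + 1, hiL, ?_⟩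
        rcases hpos _ hiL with ⟨h1, h9⟩
        rw [ix_of_pos _ h1 h9]
        omega

theorem digitsOf_bounds (n : Int) : ∀ d ∈ digitsOf n, 0 ≤ d ∧ d < 10 := by
  fun_induction digitsOf n with
  | case1 n h ih =>
    intro d hd
    rcases List.mem_cons.mp hd with rfl | hd
    · exact ⟨PySem.Int.mod_nonneg _ (by norm_num), PySem.Int.mod_lt _ (by norm_num)⟩
    · exact ih d hd
  | case2 n h => intro d hd; simp at hd

theorem alt_iff_perm (n : Int) :
    is_pandigit_alt n = true ↔
      (digitsOf n).Perm (PySem.List.pyRange 1 (((digitsOf n).length : Int) + 1) 1) := by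
  unfold is_pandigit_alt
  simp only [beq_iff_eq]
  constructor
  · intro h
    have hp := PySem.List.sorted_perm (digitsOf n) (fun x => x) false
    rw [h] at hp
    exact hp.symm
  · intro hperm
    exact PySem.List.sorted_eq_of_perm_of_pairwise_lt _ _ _ hperm.symm
      (PySem.List.pairwise_lt_pyRange_one 1 (((digitsOf n).length : Int) + 1))

-- ===== VERDICT (by name: the statement is the Claim_ definition above) =====
theorem is_pandigit_spec : Claim_equal_is_pandigit := by
  intro n _
  unfold Spec_is_pandigit is_pandigit
  have h : aLoop n 0 0 = goA (digitsOf n) 0 0 := by simpa using aLoop_eq_goA n 0 0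
  rw [h, Bool.eq_iff_iff, goA_zero_iff_perm _ (digitsOf_bounds n), alt_iff_perm n]
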